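-- pv_equiv track=rewrite | github.com/ChuaHanChong/DeepSDF | deep_sdf/data.py | build_category_maps
-- ===== SOURCE A (Python) =====
-- def build_category_maps(split):
--     """Build integer ID mappings used by training loop for category embedding lookups.
--
--     Returns:
--         index_to_cat_id: list[int] — category ID for each flat dataset index
--             e.g. [0, 0, 0, 0, 0, 1, 2, 2] for 5 chairs, 1 lamp, 2 tables
--             Used as: batch_cat_ids = index_to_cat_id_tensor[batch_indices]  -> (N,) long
--         cat_name_to_id: dict — category name to integer ID
--         num_categories: int — total number of categories
--     """
--     index_to_cat_id = []
--     cat_name_to_id = {}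
--     cat_counter = 0
--     for dataset in split:
--         for class_name in split[dataset]:
--             if class_name not in cat_name_to_id:
--                 cat_name_to_id[class_name] = cat_counter
--                 cat_counter += 1
--             cat_id = cat_name_to_id[class_name]
--             for instance_name in split[dataset][class_name]:
--                 index_to_cat_id.append(cat_id)
--     num_categories = cat_counter
--     return index_to_cat_id, cat_name_to_id, num_categories
-- ===== SOURCE B (Python) =====
-- def build_category_maps(split):
--     """Sort-based rebuild: a reverse overwrite pass records each class name's
--     first-occurrence position; sorting the distinct names by that position
--     yields the ID order; IDs are then emitted by table lookup and repetition."""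
--     names = [n for cls in split.values() for n in cls]
--     firsts = {}
--     for i, n in reversed(list(enumerate(names))):
--         firsts[n] = i
--     order = sorted(firsts, key=firsts.get)
--     cat_name_to_id = {n: k for k, n in enumerate(order)}
--     index_to_cat_id = []
--     for cls in split.values():
--         for name, insts in cls.items():
--             index_to_cat_id += [cat_name_to_id[name]] * len(insts)
--     return index_to_cat_id, cat_name_to_id, len(order)
-- ===== Notes on version B (the rewrite author's own statement) =====
-- stated objective: alternative
-- what changed: Replaces A's interleaved build-and-emit loop with a running counter by a sort-based ranking: a reverse overwrite pass records each class name's first-occurrence position in the flattened name stream, sorting the distinct names by that position yields the ID assignment, and a final pass emits IDs by table lookup and list repetition.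
import Mathlib
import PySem

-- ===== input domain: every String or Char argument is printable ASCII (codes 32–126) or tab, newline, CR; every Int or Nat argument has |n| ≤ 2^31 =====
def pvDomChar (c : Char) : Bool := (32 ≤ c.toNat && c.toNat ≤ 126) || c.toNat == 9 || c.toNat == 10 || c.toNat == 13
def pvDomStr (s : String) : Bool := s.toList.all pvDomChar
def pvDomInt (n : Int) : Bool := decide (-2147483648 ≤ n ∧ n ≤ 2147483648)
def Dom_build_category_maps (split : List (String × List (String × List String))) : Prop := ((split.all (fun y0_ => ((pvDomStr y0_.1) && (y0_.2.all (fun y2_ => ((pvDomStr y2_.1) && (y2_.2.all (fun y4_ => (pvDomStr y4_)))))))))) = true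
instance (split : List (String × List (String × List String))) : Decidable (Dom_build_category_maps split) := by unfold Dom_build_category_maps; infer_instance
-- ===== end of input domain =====

-- B replaces A's interleaved build-and-emit loop (running counter) by a sort-based
-- ranking: a reverse overwrite pass records first-occurrence positions, sorting the
-- distinct names by position gives the ID order, then IDs are emitted by table lookup
-- and repetition; objective: alternative algorithm, same result.


-- ===== PORT A =====
-- one step of A's body for a single class: register the class if unseen, then append
-- its ID once per instance ('cat_name_to_id[class_name]' cannot raise: the key was just ensured, so getD)
def aClassStep (st : List Int × PySem.Dict String Int × Int) (cls : String × List String) :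
    List Int × PySem.Dict String Int × Int :=
  let catctr :=
    if (st.2.1.contains cls.1) = false then (st.2.1.insert cls.1 st.2.2, st.2.2 + 1)
    else (st.2.1, st.2.2)
  let cat_id := catctr.1.getD cls.1 0
  (cls.2.foldl (fun idx _ => idx ++ [cat_id]) st.1, catctr.1, catctr.2)

def build_category_maps (split : List (String × List (String × List String))) : List Int × (List (String × Int)) × Int :=
  let st := split.foldl (fun st dataset => dataset.2.foldl aClassStep st)
    ([], PySem.Dict.empty, 0)
  (st.1, st.2.1.items, st.2.2)

-- ===== PORT B =====
def bNames (split : List (String × List (String × List String))) : List String :=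
  split.flatMap (fun cls => cls.2.map Prod.fst)

-- for i, n in reversed(list(enumerate(names))): firsts[n] = i
def bFirsts (names : List String) : PySem.Dict String Int :=
  ((PySem.List.enumerate names 0).reverse).foldl (fun d p => d.insert p.2 p.1) PySem.Dict.empty

-- sorted(firsts, key=firsts.get): every key sorted sees is in firsts, so getD is exact
def bOrder (names : List String) : List String :=
  PySem.List.sorted (bFirsts names).keys (fun n => (bFirsts names).getD n 0) false

-- {n: k for k, n in enumerate(order)}
def bCat (names : List String) : PySem.Dict String Int :=
  PySem.Dict.ofList ((PySem.List.enumerate (bOrder names) 0).map (fun p => (p.2, p.1)))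

def build_category_maps_alt (split : List (String × List (String × List String))) : List Int × (List (String × Int)) × Int :=
  let names := bNames split
  let cat := bCat names
  -- 'cat_name_to_id[name]' cannot raise: every class name is in the table, so getD
  let idx := split.foldl (fun acc cls => cls.2.foldl
    (fun acc c => acc ++ PySem.List.pyRepeat [cat.getD c.1 0] ((c.2.length : Int))) acc) []
  (idx, cat.items, (((bOrder names).length : Int)))

-- ===== PRECONDITION & SPEC =====
def Spec_build_category_maps (split : List (String × List (String × List String))) (out : List Int × (List (String × Int)) × Int) : Prop := out = build_category_maps_alt split
instance (split : List (String × List (String × List String))) (out : List Int × (List (String × Int)) × Int) : Decidable (Spec_build_category_maps split out) := by unfold Spec_build_category_maps; infer_instance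

-- ===== CLAIM (what is proved, stated in full; the proofs are below) =====
def Claim_equal_build_category_maps : Prop := ∀ (split : List (String × List (String × List String))), Dom_build_category_maps split → Spec_build_category_maps split (build_category_maps split)

-- ===== LEMMAS AND PROOFS =====

-- the category table after having seen the class names `seen` (in order)
def catOf (seen : List String) : PySem.Dict String Int :=
  PySem.Dict.mk ((PySem.List.enumerate (PySem.Set.ofList seen)).map (fun p => (p.2, p.1)))

theorem keys_catOf (seen : List String) : (catOf seen).keys = PySem.Set.ofList seen := by
  simp [catOf, PySem.Dict.keys, List.map_map, Function.comp_def, PySem.List.map_snd_enumerate]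

theorem contains_catOf (seen : List String) (c : String) :
    (catOf seen).contains c = decide (c ∈ seen) := by
  rw [PySem.Dict.contains_eq_decide_mem_keys, keys_catOf]
  simp [PySem.Set.mem_ofList]

theorem catOf_append_mem (seen : List String) (c : String) (h : c ∈ seen) :
    catOf (seen ++ [c]) = catOf seen := by
  unfold catOf
  rw [PySem.Set.ofList_append_singleton, PySem.Set.add_of_mem (by simpa [PySem.Set.mem_ofList] using h)]

theorem catOf_append_not_mem (seen : List String) (c : String) (h : c ∉ seen) :
    catOf (seen ++ [c]) = (catOf seen).insert c (((PySem.Set.ofList seen).length : Int)) := by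
  apply PySem.Dict.ext
  rw [PySem.Dict.items_insert_of_not_contains _ _ (by simp [contains_catOf, h])]
  unfold catOf
  rw [PySem.Set.ofList_append_singleton,
    PySem.Set.add_of_not_mem (by simpa [PySem.Set.mem_ofList] using h),
    PySem.List.enumerate_append]
  simp [PySem.List.enumerate]

theorem get?_mk_append_left {κ ν : Type} [BEq κ] [LawfulBEq κ] (p q : List (κ × ν)) (k : κ)
    (h : k ∈ p.map Prod.fst) : (PySem.Dict.mk (p ++ q)).get? k = (PySem.Dict.mk p).get? k := by
  induction p with
  | nil => simp at h
  | cons hd tl ih =>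
    rw [List.cons_append, PySem.Dict.get?_mk_cons, PySem.Dict.get?_mk_cons]
    by_cases he : (hd.1 == k) = true
    · simp [he]
    · simp only [he]
      apply ih
      rw [List.map_cons] at h
      rcases List.mem_cons.mp h with h' | h'
      · exact absurd (by simp [h']) he
      · exact h'

theorem getD_catOf_append (seen m : List String) (c : String) (h : c ∈ seen) :
    (catOf (seen ++ m)).getD c 0 = (catOf seen).getD c 0 := by
  rw [PySem.Dict.getD_eq_get?_getD, PySem.Dict.getD_eq_get?_getD]
  congr 1
  have hq : catOf (seen ++ m) = PySem.Dict.mk ((catOf seen).items ++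
      ((PySem.List.enumerate
          ((PySem.Set.ofList m).filter (fun y => !(PySem.Set.contains (PySem.Set.ofList seen) y)))
          (((PySem.Set.ofList seen).length : Int))).map (fun p => (p.2, p.1)))) := by
    apply PySem.Dict.ext
    show ((PySem.List.enumerate (PySem.Set.ofList (seen ++ m))).map (fun p => (p.2, p.1))) = _
    rw [PySem.Set.ofList_append, PySem.Set.update_eq_append_filter, PySem.List.enumerate_append,
      List.map_append]
    simp [catOf]
  rw [hq, get?_mk_append_left]
  have hk : (catOf seen).items.map Prod.fst = (catOf seen).keys := rfl
  rw [hk, keys_catOf]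
  simpa [PySem.Set.mem_ofList] using h

-- the emission (pass 3 of B) over one dataset's classes / over the whole split
def emitC (D : PySem.Dict String Int) (cls : List (String × List String)) : List Int :=
  cls.flatMap (fun c => c.2.map (fun _ => D.getD c.1 0))

def emitS (D : PySem.Dict String Int) (split : List (String × List (String × List String))) : List Int :=
  split.flatMap (fun ds => emitC D ds.2)

def namesOf (split : List (String × List (String × List String))) : List String :=
  split.flatMap (fun classes => classes.2.map Prod.fst)

theorem emitC_congr (D D' : PySem.Dict String Int) (cls : List (String × List String))
    (h : ∀ p ∈ cls, D.getD p.1 0 = D'.getD p.1 0) : emitC D cls = emitC D' cls := by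
  unfold emitC
  induction cls with
  | nil => rfl
  | cons hd tl ih =>
    simp only [List.flatMap_cons]
    rw [h hd (List.mem_cons_self), ih (fun p hp => h p (List.mem_cons_of_mem _ hp))]

theorem class_step (seen : List String) (idx : List Int) (c : String) (insts : List String) :
    aClassStep (idx, catOf seen, ((PySem.Set.ofList seen).length : Int)) (c, insts) =
      (idx ++ insts.map (fun _ => (catOf (seen ++ [c])).getD c 0),
       catOf (seen ++ [c]),
       ((PySem.Set.ofList (seen ++ [c])).length : Int)) := by
  by_cases hm : c ∈ seen
  · have hmem : c ∈ PySem.Set.ofList seen := by simpa [PySem.Set.mem_ofList] using hm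
    have hc : (catOf seen).contains c = true := by simp [contains_catOf, hm]
    have hcat : catOf (seen ++ [c]) = catOf seen := catOf_append_mem seen c hm
    have hlen : PySem.Set.ofList (seen ++ [c]) = PySem.Set.ofList seen := by
      rw [PySem.Set.ofList_append_singleton, PySem.Set.add_of_mem hmem]
    unfold aClassStep
    simp only [hc, Bool.true_eq_false, if_false, hcat, hlen,
      PySem.List.foldl_append_singleton_eq_map]
  · have hmem : c ∉ PySem.Set.ofList seen := by simpa [PySem.Set.mem_ofList] using hm
    have hc : (catOf seen).contains c = false := by simp [contains_catOf, hm]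
    have hcat : (catOf seen).insert c (((PySem.Set.ofList seen).length : Int)) =
        catOf (seen ++ [c]) := (catOf_append_not_mem seen c hm).symm
    have hlen : PySem.Set.ofList (seen ++ [c]) = PySem.Set.ofList seen ++ [c] := by
      rw [PySem.Set.ofList_append_singleton, PySem.Set.add_of_not_mem hmem]
    unfold aClassStep
    simp only [hc, if_true, hcat, hlen,
      PySem.List.foldl_append_singleton_eq_map, List.length_append, List.length_cons,
      List.length_nil, Nat.cast_add, Nat.cast_one, zero_add]

theorem inner_loop (cls : List (String × List String)) :
    ∀ (seen : List String) (idx : List Int),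
    cls.foldl aClassStep (idx, catOf seen, ((PySem.Set.ofList seen).length : Int)) =
      (idx ++ emitC (catOf (seen ++ cls.map Prod.fst)) cls,
       catOf (seen ++ cls.map Prod.fst),
       ((PySem.Set.ofList (seen ++ cls.map Prod.fst)).length : Int)) := by
  induction cls with
  | nil => intro seen idx; simp [emitC]
  | cons hd tl ih =>
    intro seen idx
    rw [List.foldl_cons, show hd = (hd.1, hd.2) from rfl, class_step, ih (seen ++ [hd.1])]
    have hassoc : seen ++ [hd.1] ++ tl.map Prod.fst = seen ++ (hd :: tl).map Prod.fst := by simp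
    rw [hassoc]
    have hid : (catOf (seen ++ [hd.1])).getD hd.1 0 =
        (catOf (seen ++ (hd :: tl).map Prod.fst)).getD hd.1 0 := by
      rw [← hassoc]
      exact (getD_catOf_append (seen ++ [hd.1]) (tl.map Prod.fst) hd.1 (by simp)).symm
    simp only [emitC, List.flatMap_cons, hid, List.append_assoc]

theorem outer_loop (split : List (String × List (String × List String))) :
    ∀ (seen : List String) (idx : List Int),
    split.foldl (fun st dataset => dataset.2.foldl aClassStep st)
      (idx, catOf seen, ((PySem.Set.ofList seen).length : Int)) =
      (idx ++ emitS (catOf (seen ++ namesOf split)) split,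
       catOf (seen ++ namesOf split),
       ((PySem.Set.ofList (seen ++ namesOf split)).length : Int)) := by
  induction split with
  | nil => intro seen idx; simp [emitS, namesOf]
  | cons hd tl ih =>
    intro seen idx
    rw [List.foldl_cons, inner_loop, ih (seen ++ hd.2.map Prod.fst)]
    have hassoc : seen ++ hd.2.map Prod.fst ++ namesOf tl = seen ++ namesOf (hd :: tl) := by
      simp [namesOf]
    rw [hassoc]
    have hemit : emitC (catOf (seen ++ hd.2.map Prod.fst)) hd.2 =
        emitC (catOf (seen ++ namesOf (hd :: tl))) hd.2 := by
      apply emitC_congr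
      intro p hp
      rw [← hassoc]
      exact (getD_catOf_append (seen ++ hd.2.map Prod.fst) (namesOf tl) p.1
        (List.mem_append.mpr (Or.inr (List.mem_map_of_mem hp)))).symm
    simp only [emitS, List.flatMap_cons, hemit, List.append_assoc]

-- === B-side lemmas: the reverse overwrite pass computes first-occurrence positions ===

-- get? after folding swapped inserts = first matching pair of the reversed list
theorem get?_foldl_insert_swap (ps : List (Int × String)) (d : PySem.Dict String Int) (n : String) :
    (ps.foldl (fun d p => d.insert p.2 p.1) d).get? n =
      match ps.reverse.find? (fun p => p.2 == n) with
      | some p => some p.1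
      | none => d.get? n := by
  induction ps generalizing d with
  | nil => simp
  | cons q rest ih =>
    rw [List.foldl_cons, ih, List.reverse_cons, List.find?_append]
    cases hf : rest.reverse.find? (fun p => p.2 == n) with
    | some p => simp
    | none =>
      by_cases hq : q.2 = n
      · simp [hq]
      · simp [hq, PySem.Dict.get?_insert, Ne.symm hq]

-- find? over enumerate locates the first occurrence
theorem find?_enumerate (names : List String) (n : String) (s : Int) :
    (PySem.List.enumerate names s).find? (fun p => p.2 == n) =
      if n ∈ names then some (s + (names.idxOf n : Int), n) else none := by
  induction names generalizing s with
  | nil => simp [PySem.List.enumerate_nil]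
  | cons h t ih =>
    rw [PySem.List.enumerate_cons]
    by_cases hn : h = n
    · subst hn
      simp [List.idxOf_cons_self]
    · rw [show (List.find? (fun p : Int × String => p.2 == n)
          ((s, h) :: PySem.List.enumerate t (s + 1)))
          = List.find? (fun p : Int × String => p.2 == n) (PySem.List.enumerate t (s + 1)) from by
            simp [hn], ih]
      by_cases hm : n ∈ t
      · have hmm : n ∈ h :: t := List.mem_cons_of_mem _ hm
        simp only [hm, if_true, hmm]
        rw [List.idxOf_cons_ne _ hn]
        have harith : s + 1 + (t.idxOf n : Int) = s + (((t.idxOf n).succ : Nat) : Int) := by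
          push_cast; ring
        rw [harith]
      · have hmm : n ∉ h :: t := by simp [hm, Ne.symm hn]
        simp [hm, hmm]

theorem getD_bFirsts (names : List String) (n : String) (h : n ∈ names) :
    (bFirsts names).getD n 0 = (names.idxOf n : Int) := by
  unfold bFirsts
  rw [PySem.Dict.getD_eq_get?_getD, get?_foldl_insert_swap, List.reverse_reverse,
    find?_enumerate]
  simp [h]

theorem keys_bFirsts (names : List String) :
    (bFirsts names).keys = PySem.Set.ofList names.reverse := by
  unfold bFirsts
  rw [PySem.Dict.keys_foldl_insert_key]
  have hupd : ∀ xs : List String, PySem.Set.update (PySem.Dict.empty : PySem.Dict String Int).keys xs = PySem.Set.ofList xs := fun _ => rfl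
  rw [hupd]
  congr 1
  rw [List.map_reverse, PySem.List.map_snd_enumerate]

theorem pairwise_idxOf_ofList (names : List String) :
    (PySem.Set.ofList names).Pairwise (fun a b => (names.idxOf a : Int) < (names.idxOf b : Int)) := by
  induction names using List.reverseRecOn with
  | nil => simp
  | append_singleton ys c ih =>
    rw [PySem.Set.ofList_append_singleton]
    by_cases hc : c ∈ ys
    · rw [PySem.Set.add_of_mem (by simpa [PySem.Set.mem_ofList] using hc)]
      refine List.Pairwise.imp_of_mem ?_ ih
      intro a b ha hb hab
      have ha' : a ∈ ys := by simpa [PySem.Set.mem_ofList] using ha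
      have hb' : b ∈ ys := by simpa [PySem.Set.mem_ofList] using hb
      rw [List.idxOf_append_of_mem ha', List.idxOf_append_of_mem hb']
      exact hab
    · rw [PySem.Set.add_of_not_mem (by simpa [PySem.Set.mem_ofList] using hc)]
      rw [List.pairwise_append]
      refine ⟨List.Pairwise.imp_of_mem ?_ ih, by simp, ?_⟩
      · intro a b ha hb hab
        have ha' : a ∈ ys := by simpa [PySem.Set.mem_ofList] using ha
        have hb' : b ∈ ys := by simpa [PySem.Set.mem_ofList] using hb
        rw [List.idxOf_append_of_mem ha', List.idxOf_append_of_mem hb']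
        exact hab
      · intro a ha b hb
        have hb' : b = c := by simpa using hb
        rw [hb']
        have ha' : a ∈ ys := by simpa [PySem.Set.mem_ofList] using ha
        rw [List.idxOf_append_of_mem ha', List.idxOf_append_of_notMem hc]
        have h1 : ys.idxOf a < ys.length := List.idxOf_lt_length_of_mem ha'
        have h2 : [c].idxOf c = 0 := by simp
        rw [h2]
        exact_mod_cast Nat.lt_of_lt_of_le h1 (Nat.le_add_right _ _)

theorem order_eq_ofList (names : List String) :
    bOrder names = PySem.Set.ofList names := by
  unfold bOrder
  apply PySem.List.sorted_eq_of_perm_of_pairwise_lt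
  · rw [keys_bFirsts]
    refine (List.perm_ext_iff_of_nodup (PySem.Set.nodup_ofList _) (PySem.Set.nodup_ofList _)).mpr ?_
    intro a
    simp [PySem.Set.mem_ofList]
  · refine List.Pairwise.imp_of_mem ?_ (pairwise_idxOf_ofList names)
    intro a b ha hb hab
    rw [getD_bFirsts _ _ (by simpa [PySem.Set.mem_ofList] using ha),
      getD_bFirsts _ _ (by simpa [PySem.Set.mem_ofList] using hb)]
    exact hab

theorem cat_eq_catOf (names : List String) : bCat names = catOf names := by
  unfold bCat
  rw [order_eq_ofList]
  have hof : ∀ (l : List (String × Int)),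
      PySem.Dict.ofList l = l.foldl (fun d p => d.insert p.1 p.2) PySem.Dict.empty := fun _ => rfl
  apply PySem.Dict.ext
  rw [hof, PySem.Dict.items_foldl_insert_fresh _ Prod.fst Prod.snd PySem.Dict.empty
      (by intro a _; rfl)
      (by rw [List.map_map]
          have hcomp : (Prod.fst ∘ fun p : Int × String => (p.2, p.1)) = fun p => p.2 := rfl
          rw [hcomp, PySem.List.map_snd_enumerate]
          exact PySem.Set.nodup_ofList names)]
  simp [catOf, Function.comp_def, PySem.Dict.empty]

-- B's emission loop is emitS
theorem emit_eq (D : PySem.Dict String Int) (split : List (String × List (String × List String))) :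
    split.foldl (fun acc cls => cls.2.foldl
      (fun acc c => acc ++ PySem.List.pyRepeat [D.getD c.1 0] ((c.2.length : Int))) acc) [] =
      emitS D split := by
  have hfun : (fun c : String × List String => PySem.List.pyRepeat [D.getD c.1 0] ((c.2.length : Int)))
      = fun c => c.2.map (fun _ => D.getD c.1 0) := by
    funext c
    rw [PySem.List.pyRepeat_singleton]
    simp [List.map_const']
  have hin : ∀ (cls : List (String × List String)) (acc : List Int),
      cls.foldl (fun acc c => acc ++ PySem.List.pyRepeat [D.getD c.1 0] ((c.2.length : Int))) acc
        = acc ++ emitC D cls := by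
    intro cls acc
    rw [PySem.List.foldl_append_eq_flatMap]
    unfold emitC
    rw [hfun]
  suffices hgen : ∀ (sp : List (String × List (String × List String))) (acc : List Int),
      sp.foldl (fun acc cls => cls.2.foldl
        (fun acc c => acc ++ PySem.List.pyRepeat [D.getD c.1 0] ((c.2.length : Int))) acc) acc
        = acc ++ emitS D sp by
    simpa using hgen split []
  intro sp
  induction sp with
  | nil => intro acc; simp [emitS]
  | cons hd tl ih =>
    intro acc
    rw [List.foldl_cons, hin hd.2 acc, ih]
    simp [emitS, List.append_assoc]

-- ===== VERDICT (by name: the statement is the Claim_ definition above) =====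
theorem build_category_maps_spec : Claim_equal_build_category_maps := by
  intro split _
  show build_category_maps split = build_category_maps_alt split
  have hA : build_category_maps split =
      ((split.foldl (fun st dataset => dataset.2.foldl aClassStep st)
          ([], catOf [], ((PySem.Set.ofList ([] : List String)).length : Int))).1,
       (split.foldl (fun st dataset => dataset.2.foldl aClassStep st)
          ([], catOf [], ((PySem.Set.ofList ([] : List String)).length : Int))).2.1.items,
       (split.foldl (fun st dataset => dataset.2.foldl aClassStep st)
          ([], catOf [], ((PySem.Set.ofList ([] : List String)).length : Int))).2.2) := rfl
  have hCat : bCat (bNames split) = catOf (namesOf split) := cat_eq_catOf (bNames split)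
  have hOrd : bOrder (bNames split) = PySem.Set.ofList (namesOf split) :=
    order_eq_ofList (bNames split)
  have hB : build_category_maps_alt split =
      (emitS (catOf (namesOf split)) split, (catOf (namesOf split)).items,
       ((PySem.Set.ofList (namesOf split)).length : Int)) := by
    simp only [build_category_maps_alt]
    rw [hCat, hOrd, emit_eq]
  rw [hA, hB, outer_loop split [] []]
  simp
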